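-- pv_equiv track=rewrite | github.com/jwc20/rock-paper-scissors-py | rps.py | generate_beats
-- ===== SOURCE A (Python) =====
-- def generate_beats(n):
--     beats = {}
--     half = (n - 1) // 2
--     for i in range(n):
--         beats[i] = []
--         for k in range(1, half + 1):
--             beats[i].append((i + k) % n)
--     return beats
-- ===== SOURCE B (Python) =====
-- def generate_beats(n):
--     half = (n - 1) // 2
--     doubled = list(range(n)) * 2
--     return {i: doubled[i + 1 : i + 1 + half] for i in range(n)}
-- ===== Notes on version B (the rewrite author's own statement) =====
-- stated objective: idiomatic
-- what changed: B replaces A's nested loop with modular arithmetic and dict mutation by a dict comprehension that slices each row out of a doubled index list built once, eliminating the inner per-element loop and the % operation.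
import Mathlib
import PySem

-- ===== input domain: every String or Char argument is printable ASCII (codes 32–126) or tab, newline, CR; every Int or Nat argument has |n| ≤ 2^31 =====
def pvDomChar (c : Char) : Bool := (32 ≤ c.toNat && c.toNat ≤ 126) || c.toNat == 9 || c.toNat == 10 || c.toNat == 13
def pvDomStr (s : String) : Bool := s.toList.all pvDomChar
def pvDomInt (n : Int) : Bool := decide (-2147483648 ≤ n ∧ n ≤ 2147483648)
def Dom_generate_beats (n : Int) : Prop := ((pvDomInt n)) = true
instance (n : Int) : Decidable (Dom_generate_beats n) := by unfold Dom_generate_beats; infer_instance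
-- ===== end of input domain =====

-- B builds each row by slicing a doubled index list instead of A's inner modular loop (idiomatic rewrite).

-- ===== PORT A =====
def generate_beats (n : Int) : List (Int × List Int) :=
  let half := PySem.Int.floordiv (n - 1) 2
  ((PySem.List.pyRange 0 n 1).foldl (fun beats i =>
      (PySem.List.pyRange 1 (half + 1) 1).foldl
        (fun beats k => beats.modify i [] (fun r => r ++ [PySem.Int.mod (i + k) n]))
        (beats.insert i ([] : List Int)))
    PySem.Dict.empty).items

-- ===== PORT B =====
def generate_beats_alt (n : Int) : List (Int × List Int) :=
  let half := PySem.Int.floordiv (n - 1) 2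
  let doubled := PySem.List.pyRange 0 n 1 ++ PySem.List.pyRange 0 n 1
  (PySem.List.pyRange 0 n 1).map
    (fun i => (i, PySem.List.slice doubled (some (i + 1)) (some (i + 1 + half))))

-- ===== PRECONDITION & SPEC =====
def Spec_generate_beats (n : Int) (out : List (Int × List Int)) : Prop := out = generate_beats_alt n
instance (n : Int) (out : List (Int × List Int)) : Decidable (Spec_generate_beats n out) := by unfold Spec_generate_beats; infer_instance

-- ===== CLAIM (what is proved, stated in full; the proofs are below) =====
def Claim_equal_generate_beats : Prop := ∀ (n : Int), Dom_generate_beats n → Spec_generate_beats n (generate_beats n)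

-- ===== LEMMAS AND PROOFS =====

-- the value A's inner loop accumulates for row i
def pvRow (n half i : Int) : List Int :=
  (PySem.List.pyRange 1 (half + 1) 1).map (fun k => PySem.Int.mod (i + k) n)

theorem pv_modify_insert {κ ν : Type} [BEq κ] [LawfulBEq κ] (d : PySem.Dict κ ν) (k : κ) (v d0 : ν) (f : ν → ν) :
    (d.insert k v).modify k d0 f = d.insert k (f v) := by
  simp [PySem.Dict.modify, PySem.Dict.getD_insert_self, PySem.Dict.insert_insert_self]

theorem pv_inner (g : Int → Int) (l : List Int) (d : PySem.Dict Int (List Int)) (i : Int) (v : List Int) :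
    l.foldl (fun d k => d.modify i [] (fun r => r ++ [g k])) (d.insert i v)
      = d.insert i (v ++ l.map g) := by
  induction l generalizing v with
  | nil => simp
  | cons a t ih =>
      simp only [List.foldl_cons, pv_modify_insert, ih, List.map_cons]
      simp

theorem pv_A_eq_map (n : Int) :
    generate_beats n = (PySem.List.pyRange 0 n 1).map
      (fun i => (i, pvRow n (PySem.Int.floordiv (n - 1) 2) i)) := by
  unfold generate_beats
  set half := PySem.Int.floordiv (n - 1) 2 with hh
  have hbody : (fun (beats : PySem.Dict Int (List Int)) (i : Int) =>
        (PySem.List.pyRange 1 (half + 1) 1).foldl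
          (fun beats k => beats.modify i [] (fun r => r ++ [PySem.Int.mod (i + k) n]))
          (beats.insert i ([] : List Int)))
      = fun beats i => beats.insert i (pvRow n half i) := by
    funext d i
    rw [pv_inner (fun k => PySem.Int.mod (i + k) n)]
    simp [pvRow]
  simp only [hbody]
  have := PySem.Dict.items_foldl_insert_fresh (l := PySem.List.pyRange 0 n 1)
      (k := fun i => i) (v := fun i => pvRow n half i) (d := PySem.Dict.empty)
      (by intro a _; simp [PySem.Dict.contains_empty])
      (by simpa using PySem.List.nodup_pyRange_one 0 n)
  simpa using this

theorem pv_doubled_get (n : Int) (m : Nat) (hm : (m : Int) < 2 * n) :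
    (PySem.List.pyRange 0 n 1 ++ PySem.List.pyRange 0 n 1)[m]'(by
      simp [PySem.List.length_pyRange_one]; omega) = PySem.Int.mod (m : Int) n := by
  have hn : 0 < n := by omega
  rw [PySem.Int.mod_eq_emod_of_pos hn]
  rcases lt_or_ge (m : Int) n with h | h
  · rw [List.getElem_append_left (by simp [PySem.List.length_pyRange_one]; omega)]
    rw [PySem.List.getElem_pyRange_one]
    rw [Int.emod_eq_of_lt (by omega) h]
    omega
  · rw [List.getElem_append_right (by simp [PySem.List.length_pyRange_one]; omega)]
    rw [PySem.List.getElem_pyRange_one]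
    have h2 : ((m : Int)) % n = (m : Int) - n := by
      rw [← Int.sub_emod_right (m : Int) n]
      exact Int.emod_eq_of_lt (by omega) (by omega)
    rw [h2]
    simp [PySem.List.length_pyRange_one]
    omega

theorem pv_slice_eq_row (n i : Int) (h0 : 0 ≤ i) (h1 : i < n) :
    PySem.List.slice (PySem.List.pyRange 0 n 1 ++ PySem.List.pyRange 0 n 1)
        (some (i + 1)) (some (i + 1 + PySem.Int.floordiv (n - 1) 2))
      = pvRow n (PySem.Int.floordiv (n - 1) 2) i := by
  set half := PySem.Int.floordiv (n - 1) 2 with hh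
  have hn : 0 < n := by omega
  have hhalf0 : 0 ≤ half := by
    rw [hh, PySem.Int.floordiv_eq_ediv_of_pos (by norm_num)]; omega
  have hhalf1 : half ≤ n - 1 := by
    rw [hh, PySem.Int.floordiv_eq_ediv_of_pos (by norm_num)]; omega
  rw [PySem.List.slice_toNat _ (by omega) (by omega)]
  apply List.ext_getElem
  · simp [PySem.List.length_pyRange_one, pvRow]
    omega
  · intro j hj hj2
    have hjh : (j : Int) < half := by
      simp [PySem.List.length_pyRange_one, pvRow] at hj2; omega
    simp only [List.getElem_take, List.getElem_drop]
    have hidx : ((i + 1).toNat + j : Int) < 2 * n := by omega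
    rw [pv_doubled_get n ((i + 1).toNat + j) hidx]
    simp only [pvRow, List.getElem_map, PySem.List.getElem_pyRange_one]
    congr 1
    omega

-- ===== VERDICT (by name: the statement is the Claim_ definition above) =====
theorem generate_beats_spec : Claim_equal_generate_beats := by
  intro n _
  unfold Spec_generate_beats generate_beats_alt
  rw [pv_A_eq_map]
  apply List.map_congr_left
  intro i hi
  rw [PySem.List.mem_pyRange_one] at hi
  simp only [Prod.mk.injEq, true_and]
  exact (pv_slice_eq_row n i hi.1 hi.2).symm
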